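-- pv_equiv track=rewrite | github.com/shalini-susmita/data-structure-algorithms-problems | String/string53.py | Sherlock
-- ===== SOURCE A (Python) =====
-- def Sherlock(s):
-- 	a={}
-- 	e={}
-- 	for i in s:
-- 		if i in a:
-- 			a[i]=a[i]+1
-- 		else:
-- 			a[i]=1
-- 	x=list(a.values())
-- 	for i in x:
-- 		if i in e:
-- 			e[i]=e[i]+1
-- 		else:
-- 			e[i]=1
--
-- 	if len(e.keys())>2:
-- 		return 'NO'
-- 	if len(e.keys())==1:
-- 		return 'YES'
-- 	p=list(e.values())
--
-- 	if p[0]>1 and p[1]>1: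
-- 		return 'NO'
-- 	l=list(e.keys())
-- 	if abs(l[0]-l[1])>1:
-- 		return 'NO'
-- 	return 'YES'
-- ===== SOURCE B (Python) =====
-- def Sherlock(s):
--     # Sort the characters so equal ones become adjacent; scan once collecting run
--     # lengths (= character frequencies), then sort the run lengths and test the three
--     # ways the string can be valid (all equal / drop one lone char / trim the tallest run).
--     runs = []
--     prev = None
--     cur = 0
--     for c in sorted(s):
--         if c == prev:
--             cur += 1
--         else:
--             if prev is not None:
--                 runs.append(cur)
--             prev = c
--             cur = 1
--     if prev is not None:
--         runs.append(cur)
--     runs.sort()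
--     if runs[0] == runs[-1]:                              # all frequencies equal
--         return 'YES'
--     if runs[0] == 1 and runs[1] == runs[-1]:             # delete one lone character
--         return 'YES'
--     if runs[-1] == runs[0] + 1 and runs[-2] == runs[0]:  # delete one char of the single tallest run
--         return 'YES'
--     return 'NO'
-- ===== Notes on version B (the rewrite author's own statement) =====
-- stated objective: alternative
-- what changed: B drops both counting dicts: it sorts the characters and scans the runs of equal characters to get the frequencies, then sorts the run lengths and applies the textbook Sherlock validity test (all equal / remove one lone char / trim the single tallest run) instead of A's frequency-of-frequencies table.
-- intended difference: On strings whose two distinct frequencies lo<hi have a single character at lo with (lo=1 and hi>2) A returns NO where removing that lone character is valid, and with (lo>1, hi=lo+1, several characters at hi) A returns YES where no single deletion works; B returns the intended YES resp. NO. — e.g. on Sherlock("abbb"): A returns "NO", B returns "YES"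
import Mathlib
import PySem

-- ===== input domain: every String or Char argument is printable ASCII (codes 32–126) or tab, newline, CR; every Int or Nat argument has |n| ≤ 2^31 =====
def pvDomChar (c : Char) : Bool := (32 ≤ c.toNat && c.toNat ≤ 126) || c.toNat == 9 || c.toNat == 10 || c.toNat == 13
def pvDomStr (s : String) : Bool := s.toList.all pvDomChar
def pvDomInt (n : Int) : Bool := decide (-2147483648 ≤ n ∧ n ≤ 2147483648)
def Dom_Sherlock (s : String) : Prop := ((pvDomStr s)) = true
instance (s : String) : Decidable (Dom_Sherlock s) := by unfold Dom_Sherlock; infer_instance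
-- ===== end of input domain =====

-- B replaces A's two counting dicts by sorting the characters, scanning the runs of equal
-- characters (the frequencies), and testing the sorted run lengths with the textbook
-- Sherlock rule; on the D_-region below A's rule returns an unintended answer and B's differs.

-- ===== PORT A =====
-- A's 'if i in d: d[i] = d[i] + 1 else: d[i] = 1' counting loop, used twice by A
def pvCountLoop {α : Type} [BEq α] (xs : List α) : PySem.Dict α Int :=
  xs.foldl (fun d i =>
    if d.contains i then d.insert i (d.getD i 0 + 1) else d.insert i 1) PySem.Dict.empty

def Sherlock (s : String) : String :=
  let a := pvCountLoop s.toList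
  let x := a.values
  let e := pvCountLoop x
  if e.keys.length > 2 then "NO"
  else if e.keys.length = 1 then "YES"
  else
    let p := e.values
    let l := e.keys
    match PySem.List.pyGet? p 0, PySem.List.pyGet? p 1, PySem.List.pyGet? l 0, PySem.List.pyGet? l 1 with
    | some p0, some p1, some l0, some l1 =>
      if p0 > 1 ∧ p1 > 1 then "NO"
      else if |l0 - l1| > 1 then "NO"
      else "YES"
    | _, _, _, _ => ""   -- Python raises IndexError at p[0] here (only the empty string); excluded by Pre_

-- ===== PORT B =====
-- the loop body 'if c == prev: cur += 1 else: (flush; prev, cur = c, 1)' over sorted(s)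
def pvStep (st : List Int × Option Char × Int) (c : Char) : List Int × Option Char × Int :=
  if some c = st.2.1 then (st.1, st.2.1, st.2.2 + 1)
  else ((if st.2.1.isSome then st.1 ++ [st.2.2] else st.1), some c, 1)

-- the two 'if prev is not None: runs.append(cur)' flushes share this helper
def pvFinish (st : List Int × Option Char × Int) : List Int :=
  if st.2.1.isSome then st.1 ++ [st.2.2] else st.1

def Sherlock_alt (s : String) : String :=
  let st := (PySem.List.sorted s.toList (fun c => c) false).foldl pvStep ([], none, 0)
  let runs0 := pvFinish st
  let runs := PySem.List.sorted runs0 (fun v => v) false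
  -- runs[0]/runs[-1]; the none ("") case is Python's IndexError (only the empty string), excluded by Pre_
  (PySem.List.pyGet? runs 0).elim "" fun r0 =>
    (PySem.List.pyGet? runs (-1)).elim "" fun rl =>
      if r0 = rl then "YES"
      else if r0 = 1 ∧ PySem.List.pyGet? runs 1 = some rl then "YES"
      else if rl = r0 + 1 ∧ PySem.List.pyGet? runs (-2) = some r0 then "YES"
      else "NO"

-- ===== PRECONDITION & SPEC =====
-- Pre_ excludes only the empty string, on which both A and B raise IndexError.
def Pre_Sherlock (s : String) : Prop := s ≠ ""
instance (s : String) : Decidable (Pre_Sherlock s) := by unfold Pre_Sherlock; infer_instance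
def pvWitness_Sherlock : String := "aabbbc"

-- On strings whose two distinct character frequencies lo<hi have a single character at lo with
-- (lo=1 and hi>2) A returns NO where removing that lone character is valid, and with
-- (lo>1, hi=lo+1, several characters at hi) A returns YES where no single deletion works;
-- B returns the intended YES resp. NO.
-- the list of character frequencies (one per distinct character)
def pvFs (s : String) : List Nat := (List.dedup s.toList).map (fun c => s.toList.count c)

def D_Sherlock (s : String) : Prop :=
  let f := pvFs s
  ∃ m ∈ f, ∃ h ∈ f, f.Perm (m :: List.replicate (f.length - 1) h) ∧
    ((m = 1 ∧ 2 < h) ∨ (1 < m ∧ h = m + 1 ∧ 2 < f.length))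
instance (s : String) : Decidable (D_Sherlock s) := by unfold D_Sherlock; infer_instance

def Spec_Sherlock (s : String) (out : String) : Prop := ¬ D_Sherlock s → out = Sherlock_alt s
instance (s : String) (out : String) : Decidable (Spec_Sherlock s out) := by unfold Spec_Sherlock; infer_instance

def pvDiffWitness_Sherlock : String := "abbb"
def pvDiffWitnessOut_Sherlock : String × String := ("NO", "YES")

-- ===== CLAIM (what is proved, stated in full; the proofs are below) =====
def Claim_unchanged_Sherlock : Prop := ∀ (s : String), Dom_Sherlock s → Pre_Sherlock s → Spec_Sherlock s (Sherlock s)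
def Claim_changed_Sherlock : Prop := Dom_Sherlock (pvDiffWitness_Sherlock) ∧ Pre_Sherlock (pvDiffWitness_Sherlock) ∧ D_Sherlock (pvDiffWitness_Sherlock) ∧ Sherlock (pvDiffWitness_Sherlock) = pvDiffWitnessOut_Sherlock.1 ∧ Sherlock_alt (pvDiffWitness_Sherlock) = pvDiffWitnessOut_Sherlock.2 ∧ pvDiffWitnessOut_Sherlock.1 ≠ pvDiffWitnessOut_Sherlock.2
def Claim_exact_Sherlock : Prop := ∀ (s : String), Dom_Sherlock s → Pre_Sherlock s → D_Sherlock s → Sherlock s ≠ Sherlock_alt s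

-- ===== LEMMAS AND PROOFS =====

-- A's counting loop is collections.Counter
theorem pvCountLoop_eq_counter {α : Type} [BEq α] [LawfulBEq α] (xs : List α) :
    pvCountLoop xs = PySem.Dict.counter xs := by
  rw [← PySem.Dict.foldl_insert_getD_add_one_eq_counter]
  apply PySem.List.foldl_congr_mem
  intro d i _
  by_cases h : d.contains i
  · simp [pvCountLoop, h]
  · have h' : d.contains i = false := by simpa using h
    rw [if_neg (by simp [h']), PySem.Dict.getD_of_not_contains d (0:Int) h']
    norm_num

-- the values of Counter(xs), in insertion order
theorem pvValues_counter {α : Type} [BEq α] [LawfulBEq α] (xs : List α) :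
    (PySem.Dict.counter xs).values
      = (PySem.Set.ofList xs).map (fun k => ((xs.count k : Int))) := by
  simp only [PySem.Dict.values, PySem.Dict.items_counter, List.map_map]
  rfl

theorem pvLen2 {α : Type} (l : List α) (h : l.length = 2) : ∃ a b, l = [a, b] :=
  match l, h with | [a, b], _ => ⟨a, b, rfl⟩

-- the frequency list A works on: counts of the distinct characters, first-occurrence order
def pvX (cs : List Char) : List Int := (PySem.Set.ofList cs).map (fun c => ((cs.count c : Int)))
-- the distinct frequency values
def pvK (cs : List Char) : List Int := PySem.Set.ofList (pvX cs)


theorem pvOfList_cons_perm (d : Char) (t : List Char) :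
    (PySem.Set.ofList (d :: t)).Perm (d :: PySem.Set.ofList (t.filter (fun x => x ≠ d))) := by
  apply (List.perm_ext_iff_of_nodup (PySem.Set.nodup_ofList _) ?_).mpr
  · intro a
    simp only [PySem.Set.mem_ofList, List.mem_cons, List.mem_filter, decide_eq_true_eq]
    constructor
    · rintro (rfl | ha)
      · exact Or.inl rfl
      · by_cases had : a = d
        · exact Or.inl had
        · exact Or.inr ⟨ha, had⟩
    · rintro (rfl | ⟨ha, _⟩)
      · exact Or.inl rfl
      · exact Or.inr ha
  · refine List.Nodup.cons ?_ (PySem.Set.nodup_ofList _)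
    intro hd
    have := (PySem.Set.mem_ofList _ _).mp hd
    simp at this

theorem pvMapCount_cons (d : Char) (t : List Char) :
    ((PySem.Set.ofList (d :: t)).map (fun e => (((d :: t).count e : Int)))).Perm
      ((((t.count d : Int)) + 1) ::
        (PySem.Set.ofList (t.filter (fun x => x ≠ d))).map (fun e => ((t.count e : Int)))) := by
  have hp := (pvOfList_cons_perm d t).map (fun e => (((d :: t).count e : Int)))
  refine hp.trans ?_
  simp only [List.map_cons]
  have h1 : (((d :: t).count d : Int)) = ((t.count d : Int)) + 1 := by
    rw [List.count_cons_self]; push_cast; ring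
  rw [h1]
  apply List.Perm.cons
  rw [List.map_congr_left]
  intro e he
  have he' := (PySem.Set.mem_ofList _ _).mp he
  have hned : e ≠ d := by
    have := (List.mem_filter.mp he').2
    simpa using this
  simp [List.count_cons, hned.symm]

theorem pvG2 (l : List Char) : ∀ (runs : List Int) (c : Char) (j : Int),
    l.Pairwise (· ≤ ·) → (∀ x ∈ l, c ≤ x) →
    (pvFinish (l.foldl pvStep (runs, some c, j))).Perm
      (runs ++ (j + (l.count c : Int)) ::
        (PySem.Set.ofList (l.filter (fun x => x ≠ c))).map (fun d => ((l.count d : Int)))) := by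
  induction l with
  | nil =>
    intro runs c j _ _
    simp [pvFinish, PySem.Set.ofList]
  | cons d t ih =>
    intro runs c j hpair hle
    have hpt : t.Pairwise (· ≤ ·) := hpair.of_cons
    have hdt : ∀ x ∈ t, d ≤ x := fun x hx => List.rel_of_pairwise_cons hpair hx
    by_cases hdc : d = c
    · subst hdc
      have hstep : pvStep (runs, some d, j) d = (runs, some d, j + 1) := by
        simp [pvStep]
      rw [List.foldl_cons, hstep]
      have := ih runs d (j + 1) hpt hdt
      refine this.trans ?_
      have hcnt : ((d :: t).count d : Int) = (t.count d : Int) + 1 := by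
        rw [List.count_cons_self]; push_cast; ring
      have hfil : (d :: t).filter (fun x => x ≠ d) = t.filter (fun x => x ≠ d) := by
        simp
      have hmap : ∀ e ∈ PySem.Set.ofList (t.filter (fun x => x ≠ d)),
          ((t.count e : Int)) = (((d :: t).count e : Int)) := by
        intro e he
        have he' := (PySem.Set.mem_ofList _ _).mp he
        have hne : e ≠ d := by simpa using (List.mem_filter.mp he').2
        simp [List.count_cons, hne.symm]
      rw [hcnt, hfil, List.map_congr_left hmap]
      apply List.Perm.append_left
      have : j + 1 + (List.count d t : Int) = j + ((List.count d t : Int) + 1) := by ring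
      rw [this]
    · have hcd : c ≤ d := hle d (List.mem_cons_self)
      have hclt : c < d := lt_of_le_of_ne hcd (fun h => hdc h.symm)
      have hcnott : c ∉ t := fun h => absurd (hdt c h) (not_le.mpr hclt)
      have hstep : pvStep (runs, some c, j) d = (runs ++ [j], some d, 1) := by
        simp [pvStep, fun h : d = c => hdc h]
      rw [List.foldl_cons, hstep]
      have := ih (runs ++ [j]) d 1 hpt hdt
      refine this.trans ?_
      have hcnt : ((d :: t).count c : Int) = 0 := by
        rw [List.count_cons_of_ne (Ne.symm (fun h => hdc h.symm)), List.count_eq_zero.mpr hcnott]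
        rfl
      have hfil : (d :: t).filter (fun x => x ≠ c) = d :: t := by
        apply List.filter_eq_self.mpr
        intro a ha
        rcases List.mem_cons.mp ha with rfl | hat
        · simpa using hdc
        · have : c < a := lt_of_lt_of_le hclt (hdt a hat)
          simpa using (ne_of_gt this)
      rw [hcnt, hfil, List.append_assoc]
      apply List.Perm.append_left
      simp only [List.singleton_append]
      have h0 : (j + (0:Int)) = j := by ring
      rw [h0]
      apply List.Perm.cons
      have hc : (1 + (List.count d t : Int)) = ((List.count d t : Int) + 1) := by ring
      rw [hc]
      exact (pvMapCount_cons d t).symm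


theorem pvSetPerm {α : Type} [DecidableEq α] {l l' : List α} (h : l'.Perm l) :
    (PySem.Set.ofList l').Perm (PySem.Set.ofList l) := by
  apply (List.perm_ext_iff_of_nodup (PySem.Set.nodup_ofList _) (PySem.Set.nodup_ofList _)).mpr
  intro a
  rw [PySem.Set.mem_ofList, PySem.Set.mem_ofList]
  exact h.mem_iff

theorem pvXPerm {cs' cs : List Char} (h : cs'.Perm cs) :
    ((PySem.Set.ofList cs').map (fun c => ((cs'.count c : Int)))).Perm (pvX cs) := by
  have h1 : (PySem.Set.ofList cs').map (fun c => ((cs'.count c : Int)))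
      = (PySem.Set.ofList cs').map (fun c => ((cs.count c : Int))) := by
    apply List.map_congr_left
    intro e _
    rw [h.count_eq]
  rw [h1, pvX]
  exact (pvSetPerm h).map _

theorem pvRunsPerm (cs : List Char) (h : cs ≠ []) :
    (pvFinish ((PySem.List.sorted cs (fun c => c) false).foldl pvStep ([], none, 0))).Perm (pvX cs) := by
  have hperm : (PySem.List.sorted cs (fun c => c) false).Perm cs := PySem.List.sorted_perm cs _ false
  have hpair : (PySem.List.sorted cs (fun c => c) false).Pairwise (fun a b => a ≤ b) :=
    PySem.List.sorted_pairwise cs _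
  have hne' : PySem.List.sorted cs (fun c => c) false ≠ [] := by
    rw [Ne, PySem.List.sorted_eq_nil_iff]; exact h
  rcases hcs' : PySem.List.sorted cs (fun c => c) false with _ | ⟨c, t⟩
  · exact absurd hcs' hne'
  rw [hcs'] at hperm hpair
  have hstep : pvStep ([], none, 0) c = ([], some c, 1) := by simp [pvStep]
  rw [List.foldl_cons, hstep]
  have hG := pvG2 t [] c 1 hpair.of_cons (fun x hx => List.rel_of_pairwise_cons hpair hx)
  refine hG.trans ?_
  simp only [List.nil_append]
  have h1 : (1 : Int) + (t.count c : Int) = (t.count c : Int) + 1 := by ring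
  rw [h1]
  exact ((pvMapCount_cons c t).symm).trans (pvXPerm hperm)

-- the sorted run-length list of B
def pvR (s : String) : List Int :=
  PySem.List.sorted
    (pvFinish ((PySem.List.sorted s.toList (fun c => c) false).foldl pvStep ([], none, 0)))
    (fun v => v) false

theorem pvBeval (s : String) :
    Sherlock_alt s =
      ((PySem.List.pyGet? (pvR s) 0).elim "" fun r0 =>
        (PySem.List.pyGet? (pvR s) (-1)).elim "" fun rl =>
          if r0 = rl then "YES"
          else if r0 = 1 ∧ PySem.List.pyGet? (pvR s) 1 = some rl then "YES"
          else if rl = r0 + 1 ∧ PySem.List.pyGet? (pvR s) (-2) = some r0 then "YES"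
          else "NO") := rfl

theorem pvAeval (s : String) :
    Sherlock s =
      (if (pvK s.toList).length > 2 then "NO"
       else if (pvK s.toList).length = 1 then "YES"
       else
         match PySem.List.pyGet? ((pvK s.toList).map (fun k => (((pvX s.toList).count k : Int)))) 0,
               PySem.List.pyGet? ((pvK s.toList).map (fun k => (((pvX s.toList).count k : Int)))) 1,
               PySem.List.pyGet? (pvK s.toList) 0, PySem.List.pyGet? (pvK s.toList) 1 with
         | some p0, some p1, some l0, some l1 =>
           if p0 > 1 ∧ p1 > 1 then "NO" else if |l0 - l1| > 1 then "NO" else "YES"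
         | _, _, _, _ => "") := by
  simp only [Sherlock, pvCountLoop_eq_counter, pvValues_counter, PySem.Dict.keys_counter, pvX, pvK]

theorem pvRPerm (s : String) (h : s.toList ≠ []) : (pvR s).Perm (pvX s.toList) :=
  (PySem.List.sorted_perm _ _ _).trans (pvRunsPerm s.toList h)

theorem pvRSort (s : String) : (pvR s).Pairwise (fun a b => a ≤ b) :=
  PySem.List.sorted_pairwise _ _

theorem pvLeGetLast (l : List Int) : l.Pairwise (fun a b => a ≤ b) → ∀ v ∈ l, ∀ (h : l ≠ []), v ≤ l.getLast h := by
  induction l with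
  | nil => intro _ v hv; simp at hv
  | cons a t ih =>
    intro hs v hv h
    cases t with
    | nil =>
      simp only [List.mem_cons, List.not_mem_nil, or_false] at hv
      simp [hv]
    | cons b t' =>
      rw [List.getLast_cons (by simp : (b :: t' : List Int) ≠ [])]
      rcases List.mem_cons.mp hv with rfl | hvt
      · exact List.rel_of_pairwise_cons hs (List.getLast_mem (by simp))
      · exact ih hs.of_cons v hvt (by simp)

theorem pvHeadLe (a : Int) (t : List Int) (hs : (a :: t).Pairwise (fun a b => a ≤ b)) (v : Int)
    (hv : v ∈ a :: t) : a ≤ v := by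
  rcases List.mem_cons.mp hv with rfl | hvt
  · exact le_refl _
  · exact List.rel_of_pairwise_cons hs hvt


theorem pvRepl (r x : List Int) (lo hi : Int) (hperm : r.Perm x)
    (hsort : r.Pairwise (fun a b => a ≤ b)) (hlh : lo < hi)
    (hall : ∀ z ∈ x, z = lo ∨ z = hi) :
    r = List.replicate (x.count lo) lo ++ List.replicate (x.count hi) hi := by
  refine List.Perm.eq_of_pairwise (fun a b _ _ h1 h2 => le_antisymm h1 h2) hsort ?_ ?_
  · rw [List.pairwise_append]
    refine ⟨List.pairwise_replicate.mpr (Or.inr (le_refl _)),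
      List.pairwise_replicate.mpr (Or.inr (le_refl _)), ?_⟩
    intro a ha b hb
    rw [List.eq_of_mem_replicate ha, List.eq_of_mem_replicate hb]
    exact le_of_lt hlh
  · refine hperm.trans (List.perm_iff_count.mpr ?_)
    intro a
    rw [List.count_append, List.count_replicate, List.count_replicate]
    by_cases halo : a = lo
    · rw [halo]
      have hne : hi ≠ lo := ne_of_gt hlh
      simp [hne]
    · by_cases hahi : a = hi
      · rw [hahi]
        have hne : lo ≠ hi := ne_of_lt hlh
        simp [hne]
      · have hnot : a ∉ x := fun hm => by
          rcases hall a hm with h | h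
          · exact halo h
          · exact hahi h
        simp [List.count_eq_zero.mpr hnot, Ne.symm halo, Ne.symm hahi]

theorem pvReplGet0 (lo hi : Int) (cl ch : ℕ) (h0 : 1 ≤ cl) :
    PySem.List.pyGet? (List.replicate cl lo ++ List.replicate ch hi) 0 = some lo := by
  cases cl with
  | zero => omega
  | succ m => rw [List.replicate_succ, List.cons_append, PySem.List.pyGet?_zero_cons]

theorem pvReplGetLast (lo hi : Int) (cl ch : ℕ) (h1 : 1 ≤ ch) :
    PySem.List.pyGet? (List.replicate cl lo ++ List.replicate ch hi) (-1) = some hi := by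
  rw [PySem.List.pyGet?_neg_one]
  cases ch with
  | zero => omega
  | succ m => rw [List.replicate_succ', ← List.append_assoc, List.getLast?_concat]

theorem pvReplGet1 (lo hi : Int) (cl ch : ℕ) (h0 : 1 ≤ cl) (h1 : 1 ≤ ch) :
    PySem.List.pyGet? (List.replicate cl lo ++ List.replicate ch hi) 1
      = some (if cl = 1 then hi else lo) := by
  have hlen : 1 < (List.replicate cl lo ++ List.replicate ch hi).length := by
    simp; omega
  rw [show (1 : Int) = ((1 : ℕ) : Int) by norm_num,
    PySem.List.pyGet?_ofNat (List.replicate cl lo ++ List.replicate ch hi) 1 hlen]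
  congr 1
  by_cases hcl : cl = 1
  · subst hcl
    rw [if_pos rfl]
    have : (List.replicate 1 lo ++ List.replicate ch hi) = lo :: List.replicate ch hi := by
      simp
    rw [List.getElem_of_eq this hlen]
    rw [List.getElem_cons_succ]
    exact List.getElem_replicate ..
  · rw [if_neg hcl]
    have h2 : 1 < cl := by omega
    have := List.getElem?_append_left (l₁ := List.replicate cl lo) (l₂ := List.replicate ch hi)
      (i := 1) (by simpa using h2)
    have hg : (List.replicate cl lo ++ List.replicate ch hi)[1]? = some lo := by
      rw [this, List.getElem?_replicate, if_pos h2]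
    have hg2 := List.getElem?_eq_getElem (l := List.replicate cl lo ++ List.replicate ch hi)
      (i := 1) hlen
    rw [hg2] at hg
    exact Option.some_inj.mp hg

theorem pvReplGetm2 (lo hi : Int) (cl ch : ℕ) (h0 : 1 ≤ cl) (h1 : 1 ≤ ch) :
    PySem.List.pyGet? (List.replicate cl lo ++ List.replicate ch hi) (-2)
      = some (if ch = 1 then lo else hi) := by
  have hlen : (List.replicate cl lo ++ List.replicate ch hi).length = cl + ch := by simp
  have hlen2 : 2 ≤ (List.replicate cl lo ++ List.replicate ch hi).length := by rw [hlen]; omega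
  rw [PySem.List.pyGet?_neg_ofNat _ 2 (by omega) hlen2, hlen]
  by_cases hch : ch = 1
  · subst hch
    rw [if_pos rfl]
    have hidx : cl + 1 - 2 < cl := by omega
    rw [List.getElem?_append_left (by simpa using hidx), List.getElem?_replicate, if_pos hidx]
  · rw [if_neg hch]
    have hge : cl ≤ cl + ch - 2 := by omega
    rw [List.getElem?_append_right (by simpa using hge), List.getElem?_replicate]
    rw [List.length_replicate]
    rw [if_pos (by omega)]


theorem pvFsPerm (s : String) :
    (pvFs s).Perm ((PySem.Set.ofList s.toList).map (fun c => s.toList.count c)) := by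
  apply List.Perm.map
  apply (List.perm_ext_iff_of_nodup (List.nodup_dedup _) (PySem.Set.nodup_ofList _)).mpr
  intro a
  rw [List.mem_dedup, PySem.Set.mem_ofList]

theorem pvXeq (s : String) :
    pvX s.toList
      = ((PySem.Set.ofList s.toList).map (fun c => s.toList.count c)).map (fun (n : ℕ) => (n : Int)) := by
  rw [pvX, List.map_map]
  rfl

theorem pvExistsNat (s : String) (z : Int) (hz : z ∈ pvX s.toList) :
    ∃ n : ℕ, n ∈ pvFs s ∧ (n : Int) = z := by
  rw [pvXeq] at hz
  obtain ⟨n, hn, hcast⟩ := List.mem_map.mp hz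
  exact ⟨n, (pvFsPerm s).mem_iff.mpr hn, hcast⟩

theorem pvMemFsX (s : String) (n : ℕ) : n ∈ pvFs s ↔ ((n : Int) ∈ pvX s.toList) := by
  rw [pvXeq, (pvFsPerm s).mem_iff]
  constructor
  · intro h
    exact List.mem_map.mpr ⟨n, h, rfl⟩
  · intro h
    obtain ⟨m, hm, hcast⟩ := List.mem_map.mp h
    have hmn : m = n := by exact_mod_cast hcast
    rwa [← hmn]

theorem pvCountFsX (s : String) (n : ℕ) : (pvFs s).count n = (pvX s.toList).count ((n : Int)) := by
  rw [(pvFsPerm s).count_eq, pvXeq]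
  exact (List.count_map_of_injective _ _ Nat.cast_injective n).symm

theorem pvDsLen (s : String) : (List.dedup (pvFs s)).length = (pvK s.toList).length := by
  have hperm : ((List.dedup (pvFs s)).map (fun (n : ℕ) => (n : Int))).Perm (pvK s.toList) := by
    apply (List.perm_ext_iff_of_nodup ((List.nodup_dedup _).map Nat.cast_injective)
      (PySem.Set.nodup_ofList _)).mpr
    intro z
    constructor
    · intro hz
      obtain ⟨n, hn, hcast⟩ := List.mem_map.mp hz
      simp only [pvK, PySem.Set.mem_ofList]
      rw [← hcast]
      exact (pvMemFsX s n).mp (List.mem_dedup.mp hn)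
    · intro hz
      simp only [pvK, PySem.Set.mem_ofList] at hz
      obtain ⟨n, hn, hcast⟩ := pvExistsNat s z hz
      exact List.mem_map.mpr ⟨n, List.mem_dedup.mpr hn, hcast⟩
  have h := hperm.length_eq
  simpa using h

theorem pvDiffIff (s : String) (n0 n1 : ℕ) (hlt : n0 < n1) (h0 : n0 ∈ pvFs s) (h1 : n1 ∈ pvFs s)
    (hall : ∀ m ∈ pvFs s, m = n0 ∨ m = n1) :
    (D_Sherlock s ↔ ((pvFs s).count n0 = 1 ∧
      ((n0 = 1 ∧ 2 < n1) ∨ (1 < n0 ∧ n1 = n0 + 1 ∧ 1 < (pvFs s).count n1)))) := by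
  have hlen : (pvFs s).length = (pvFs s).count n0 + (pvFs s).count n1 := by
    have haux : ∀ (l : List ℕ), (∀ m ∈ l, m = n0 ∨ m = n1) →
        l.length = l.count n0 + l.count n1 := by
      intro l
      induction l with
      | nil => simp
      | cons a t ih =>
        intro hal
        have iht := ih (fun m hm => hal m (List.mem_cons_of_mem _ hm))
        rcases hal a List.mem_cons_self with rfl | rfl <;>
          simp [List.count_cons, iht, Ne.symm (ne_of_lt hlt), ne_of_lt hlt] <;> omega
    exact haux _ hall
  have hpos0 : 0 < (pvFs s).count n0 := List.count_pos_iff.mpr h0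
  have hpos1 : 0 < (pvFs s).count n1 := List.count_pos_iff.mpr h1
  constructor
  · rintro ⟨m, hm, h, hh, hperm, hcases⟩
    have hmh : m < h := by rcases hcases with ⟨rfl, hgt⟩ | ⟨hgt, rfl, -⟩ <;> omega
    have hm01 := hall m hm
    have hh01 := hall h hh
    have hm0 : m = n0 ∧ h = n1 := by
      rcases hm01 with rfl | rfl <;> rcases hh01 with rfl | rfl <;> omega
    obtain ⟨rfl, rfl⟩ := hm0
    have hcm : (pvFs s).count m = 1 := by
      rw [hperm.count_eq, List.count_cons_self, List.count_replicate,
        if_neg (by simp [hmh.ne'])]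
    have hch : (pvFs s).count h = (pvFs s).length - 1 := by
      rw [hperm.count_eq, List.count_cons_of_ne (ne_of_lt hmh), List.count_replicate]
      simp
    refine ⟨hcm, ?_⟩
    rcases hcases with ⟨ha, hb⟩ | ⟨ha, hb, hc⟩
    · exact Or.inl ⟨ha, hb⟩
    · refine Or.inr ⟨ha, hb, ?_⟩
      omega
  · rintro ⟨hcm, hcases⟩
    refine ⟨n0, h0, n1, h1, ?_, ?_⟩
    · apply List.perm_iff_count.mpr
      intro a
      by_cases ha0 : a = n0
      · subst ha0
        rw [List.count_cons_self, List.count_replicate]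
        simp [Ne.symm (ne_of_lt hlt), hcm]
      · by_cases ha1 : a = n1
        · subst ha1
          rw [List.count_cons_of_ne (ne_of_lt hlt), List.count_replicate]
          simp only [BEq.rfl, if_pos]
          omega
        · have hnot : a ∉ pvFs s := fun hmem => by
            rcases hall a hmem with h' | h'
            · exact ha0 h'
            · exact ha1 h'
          rw [List.count_eq_zero.mpr hnot]
          rw [List.count_cons, List.count_replicate]
          simp [Ne.symm ha0, Ne.symm ha1, ha0, ha1]
    · rcases hcases with ⟨ha, hb⟩ | ⟨ha, hb, hc⟩
      · exact Or.inl ⟨ha, hb⟩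
      · exact Or.inr ⟨ha, hb, by omega⟩

theorem pvL2 (s : String) (k0 k1 : Int) (hk : k0 < k1) (hs : s.toList ≠ [])
    (h0 : k0 ∈ pvX s.toList) (h1 : k1 ∈ pvX s.toList)
    (hall : ∀ z ∈ pvX s.toList, z = k0 ∨ z = k1) :
    ∃ n0 n1 cl ch : ℕ,
      k0 = (n0 : Int) ∧ k1 = (n1 : Int) ∧ n0 < n1 ∧ 1 ≤ n0 ∧ 1 ≤ cl ∧ 1 ≤ ch ∧
      (pvX s.toList).count k0 = cl ∧ (pvX s.toList).count k1 = ch ∧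
      pvR s = List.replicate cl k0 ++ List.replicate ch k1 ∧
      (D_Sherlock s ↔ (cl = 1 ∧ ((n0 = 1 ∧ 2 < n1) ∨ (1 < n0 ∧ n1 = n0 + 1 ∧ 1 < ch)))) := by
  obtain ⟨n0, hn0, hc0⟩ := pvExistsNat s k0 h0
  obtain ⟨n1, hn1, hc1⟩ := pvExistsNat s k1 h1
  have hlt : n0 < n1 := by omega
  have hn0pos : 1 ≤ n0 := by
    obtain ⟨c, hc, hceq⟩ := List.mem_map.mp hn0
    rw [← hceq]
    exact List.count_pos_iff.mpr (List.mem_dedup.mp hc)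
  refine ⟨n0, n1, (pvX s.toList).count k0, (pvX s.toList).count k1,
    hc0.symm, hc1.symm, hlt, hn0pos, List.count_pos_iff.mpr h0, List.count_pos_iff.mpr h1, rfl, rfl,
    pvRepl _ _ k0 k1 (pvRPerm s hs) (pvRSort s) hk hall, ?_⟩
  have hallfs : ∀ m ∈ pvFs s, m = n0 ∨ m = n1 := by
    intro m hm
    have hmx := (pvMemFsX s m).mp hm
    rcases hall _ hmx with h | h
    · left; exact_mod_cast h.trans hc0.symm
    · right; exact_mod_cast h.trans hc1.symm
  rw [pvDiffIff s n0 n1 hlt hn0 hn1 hallfs, pvCountFsX, pvCountFsX, hc0, hc1]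

theorem pvMatchRed (r : List Int) (a b : Int) (h0 : PySem.List.pyGet? r 0 = some a)
    (hl : PySem.List.pyGet? r (-1) = some b) :
    ((PySem.List.pyGet? r 0).elim "" fun r0 =>
      (PySem.List.pyGet? r (-1)).elim "" fun rl =>
        if r0 = rl then "YES"
        else if r0 = 1 ∧ PySem.List.pyGet? r 1 = some rl then "YES"
        else if rl = r0 + 1 ∧ PySem.List.pyGet? r (-2) = some r0 then "YES"
        else "NO")
    = (if a = b then "YES"
       else if a = 1 ∧ PySem.List.pyGet? r 1 = some b then "YES"
       else if b = a + 1 ∧ PySem.List.pyGet? r (-2) = some a then "YES"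
       else "NO") := by
  rw [h0, hl]
  rfl

theorem pvMatchRed4 (p0 p1 l0 l1 : Int) :
    (match some p0, some p1, some l0, some l1 with
     | some p0, some p1, some l0, some l1 =>
       if p0 > 1 ∧ p1 > 1 then "NO" else if |l0 - l1| > 1 then "NO" else "YES"
     | _, _, _, _ => "")
    = (if p0 > 1 ∧ p1 > 1 then "NO" else if |l0 - l1| > 1 then "NO" else "YES") := rfl

theorem pvPigeon (z1 z2 z3 a b : Int) (h12 : z1 ≠ z2) (h13 : z1 ≠ z3) (h23 : z2 ≠ z3)
    (p1 : z1 = a ∨ z1 = b) (p2 : z2 = a ∨ z2 = b) (p3 : z3 = a ∨ z3 = b) : False := by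
  rcases p1 with rfl | rfl <;> rcases p2 with h | h <;> rcases p3 with h' | h' <;> simp_all

theorem pvDlen2 (s : String) (hD : D_Sherlock s) : (pvK s.toList).length = 2 := by
  obtain ⟨m, hm, h, hh, hperm, hcases⟩ := hD
  have hmh : m ≠ h := by rcases hcases with ⟨rfl, hgt⟩ | ⟨hgt, rfl, -⟩ <;> omega
  have hlen1 : (pvFs s).length - 1 ≠ 0 := by
    intro hl0
    rw [hl0] at hperm
    have hhm := hperm.mem_iff.mp hh
    simp at hhm
    exact hmh hhm.symm
  have hds : (List.dedup (pvFs s)).Perm [m, h] := by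
    apply (List.perm_ext_iff_of_nodup (List.nodup_dedup _) (by simp [hmh])).mpr
    intro v
    rw [List.mem_dedup, hperm.mem_iff]
    simp only [List.mem_cons, List.mem_replicate, List.not_mem_nil, or_false]
    constructor
    · rintro (rfl | ⟨-, rfl⟩) <;> simp
    · rintro (rfl | rfl)
      · exact Or.inl rfl
      · exact Or.inr ⟨hlen1, rfl⟩
  rw [← pvDsLen, hds.length_eq]
  rfl

theorem pvL2main (s : String) (lo hi : Int) (hlt : lo < hi) (hs : s.toList ≠ [])
    (h0 : lo ∈ pvX s.toList) (h1 : hi ∈ pvX s.toList)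
    (hall : ∀ z ∈ pvX s.toList, z = lo ∨ z = hi) :
    ∀ hD' : Prop, (hD' ↔ D_Sherlock s) →
    ((¬ hD' →
      (if ((pvX s.toList).count lo : Int) > 1 ∧ ((pvX s.toList).count hi : Int) > 1 then "NO"
       else if |lo - hi| > 1 then "NO" else "YES")
      = ((PySem.List.pyGet? (pvR s) 0).elim "" fun r0 =>
          (PySem.List.pyGet? (pvR s) (-1)).elim "" fun rl =>
            if r0 = rl then "YES"
            else if r0 = 1 ∧ PySem.List.pyGet? (pvR s) 1 = some rl then "YES"
            else if rl = r0 + 1 ∧ PySem.List.pyGet? (pvR s) (-2) = some r0 then "YES"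
            else "NO"))
    ∧ (hD' →
      (if ((pvX s.toList).count lo : Int) > 1 ∧ ((pvX s.toList).count hi : Int) > 1 then "NO"
       else if |lo - hi| > 1 then "NO" else "YES")
      ≠ ((PySem.List.pyGet? (pvR s) 0).elim "" fun r0 =>
          (PySem.List.pyGet? (pvR s) (-1)).elim "" fun rl =>
            if r0 = rl then "YES"
            else if r0 = 1 ∧ PySem.List.pyGet? (pvR s) 1 = some rl then "YES"
            else if rl = r0 + 1 ∧ PySem.List.pyGet? (pvR s) (-2) = some r0 then "YES"
            else "NO"))) := by
  intro hD' hDiff'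
  obtain ⟨n0, n1, cl, ch, hcn0, hcn1, hnlt, hn0pos, hcl, hch, hccl, hcch, hrepl, hDiff⟩ :=
    pvL2 s lo hi hlt hs h0 h1 hall
  rw [pvMatchRed (pvR s) lo hi (by rw [hrepl]; exact pvReplGet0 _ _ _ _ hcl)
    (by rw [hrepl]; exact pvReplGetLast _ _ _ _ hch)]
  rw [hrepl, pvReplGet1 _ _ _ _ hcl hch, pvReplGetm2 _ _ _ _ hcl hch, hccl, hcch]
  subst hcn0
  subst hcn1
  rw [hDiff'.trans hDiff]
  have habs : (|((n0 : Int)) - ((n1 : Int))| > 1) ↔ n0 + 1 < n1 := by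
    rw [abs_sub_comm, abs_of_nonneg (by push_cast; omega)]
    omega
  have hq1 : (((n0 : Int)) = ((n1 : Int))) ↔ n0 = n1 := Nat.cast_inj
  have hq2 : ((if cl = 1 then ((n1 : Int)) else ((n0 : Int))) = ((n1 : Int))) ↔ cl = 1 := by
    split_ifs with h
    · simp [h]
    · constructor
      · intro hh
        exfalso
        have : n0 = n1 := by exact_mod_cast hh
        omega
      · intro hh
        exact absurd hh h
  have hq3 : ((if ch = 1 then ((n0 : Int)) else ((n1 : Int))) = ((n0 : Int))) ↔ ch = 1 := by
    split_ifs with h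
    · simp [h]
    · constructor
      · intro hh
        exfalso
        have : n1 = n0 := by exact_mod_cast hh
        omega
      · intro hh
        exact absurd hh h
  have hgt1 : (((cl : Int)) > 1 ∧ ((ch : Int)) > 1) ↔ (1 < cl ∧ 1 < ch) := by
    constructor <;> intro hh <;> exact ⟨by exact_mod_cast hh.1, by exact_mod_cast hh.2⟩
  simp only [Option.some.injEq, habs, hq1, hq2, hq3, hgt1]
  constructor
  · intro hD
    split_ifs <;> first | rfl | (exfalso; omega)
  · intro hD
    split_ifs <;> first | decide | (exfalso; omega)

theorem pvAB (s : String) (hpre : s ≠ "") :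
    (¬ D_Sherlock s → Sherlock s = Sherlock_alt s) ∧
      (D_Sherlock s → Sherlock s ≠ Sherlock_alt s) := by
  have hne : s.toList ≠ [] := by simpa using hpre
  have hXne : pvX s.toList ≠ [] := by
    obtain ⟨c, hc⟩ := List.exists_mem_of_ne_nil _ hne
    have hcV : c ∈ PySem.Set.ofList s.toList := (PySem.Set.mem_ofList _ _).mpr hc
    intro h
    rw [pvX, List.map_eq_nil_iff] at h
    rw [h] at hcV
    simp at hcV
  have hKmem : ∀ z, z ∈ pvK s.toList ↔ z ∈ pvX s.toList := fun z => PySem.Set.mem_ofList _ _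
  have hKne : pvK s.toList ≠ [] := by
    obtain ⟨z, hz⟩ := List.exists_mem_of_ne_nil _ hXne
    exact List.ne_nil_of_mem ((hKmem z).mpr hz)
  have hK1 : 0 < (pvK s.toList).length := List.length_pos_of_ne_nil hKne
  have hRperm := pvRPerm s hne
  have hRsort := pvRSort s
  have hRne : pvR s ≠ [] := by
    intro h
    have := hRperm.length_eq
    rw [h] at this
    exact hXne (List.eq_nil_of_length_eq_zero this.symm)
  rw [pvAeval, pvBeval]
  by_cases h2 : (pvK s.toList).length > 2
  · -- three or more distinct frequencies: A says NO, B says NO, D is false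
    rw [if_pos h2]
    have hDnot : ¬ D_Sherlock s := fun hD => by rw [pvDlen2 s hD] at h2; omega
    refine ⟨fun _ => ?_, fun hD => absurd hD hDnot⟩
    rcases hKc : pvK s.toList with _ | ⟨z1, tK⟩
    · exact absurd hKc hKne
    rcases tK with _ | ⟨z2, tK2⟩
    · rw [hKc] at h2; simp at h2
    rcases tK2 with _ | ⟨z3, tK3⟩
    · rw [hKc] at h2; simp at h2
    have hNod : (pvK s.toList).Nodup := PySem.Set.nodup_ofList _
    rw [hKc] at hNod
    simp only [List.nodup_cons, List.mem_cons] at hNod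
    have h12 : z1 ≠ z2 := fun h => hNod.1 (Or.inl h)
    have h13 : z1 ≠ z3 := fun h => hNod.1 (Or.inr (Or.inl h))
    have h23 : z2 ≠ z3 := fun h => hNod.2.1 (Or.inl h)
    have hz1r : z1 ∈ pvR s := hRperm.mem_iff.mpr ((hKmem z1).mp (by rw [hKc]; simp))
    have hz2r : z2 ∈ pvR s := hRperm.mem_iff.mpr ((hKmem z2).mp (by rw [hKc]; simp))
    have hz3r : z3 ∈ pvR s := hRperm.mem_iff.mpr ((hKmem z3).mp (by rw [hKc]; simp))
    obtain ⟨a, t, hr⟩ := List.exists_cons_of_ne_nil hRne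
    have hrne2 : pvR s ≠ [] := hRne
    have hlast : PySem.List.pyGet? (pvR s) (-1) = some ((pvR s).getLast hrne2) := by
      rw [PySem.List.pyGet?_neg_one, List.getLast?_eq_some_getLast hrne2]
    have hget0 : PySem.List.pyGet? (pvR s) 0 = some a := by
      rw [hr]
      exact PySem.List.pyGet?_zero_cons ..
    have hlow : ∀ v ∈ pvR s, a ≤ v := by
      intro v hv
      rw [hr] at hv
      exact pvHeadLe a t (hr ▸ hRsort) v hv
    have hup : ∀ v ∈ pvR s, v ≤ (pvR s).getLast hrne2 := fun v hv =>
      pvLeGetLast _ hRsort v hv hrne2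
    have hc1 : ¬ (a = (pvR s).getLast hrne2) := by
      intro haeq
      have h1a : z1 = a := le_antisymm (by rw [haeq]; exact hup z1 hz1r) (hlow z1 hz1r)
      have h2a : z2 = a := le_antisymm (by rw [haeq]; exact hup z2 hz2r) (hlow z2 hz2r)
      exact h12 (h1a.trans h2a.symm)
    have hc2 : ¬ (a = 1 ∧ PySem.List.pyGet? (pvR s) 1 = some ((pvR s).getLast hrne2)) := by
      rintro ⟨-, hget⟩
      by_cases ht : t = []
      · have hz1a : z1 ∈ [a] := by rw [← ht, ← hr]; exact hz1r
        have hz2a : z2 ∈ [a] := by rw [← ht, ← hr]; exact hz2r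
        simp only [List.mem_singleton] at hz1a hz2a
        exact h12 (hz1a.trans hz2a.symm)
      · obtain ⟨b, t', htbt⟩ := List.exists_cons_of_ne_nil ht
        rw [htbt] at hr
        have hb : PySem.List.pyGet? (pvR s) 1 = some b := by
          rw [hr, show (1 : Int) = ((1 : ℕ) : Int) by norm_num, PySem.List.pyGet?_natCast]
          rfl
        rw [hb] at hget
        have hbrl : b = (pvR s).getLast hrne2 := Option.some_inj.mp hget
        have hvals : ∀ v ∈ pvR s, v = a ∨ v = (pvR s).getLast hrne2 := by
          intro v hv
          have hv' := hv
          rw [hr] at hv'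
          rcases List.mem_cons.mp hv' with rfl | hv2
          · exact Or.inl rfl
          rcases List.mem_cons.mp hv2 with rfl | hv3
          · exact Or.inr hbrl
          · right
            have hsort' : (a :: b :: t').Pairwise (fun x y => x ≤ y) := hr ▸ hRsort
            have hble : b ≤ v := List.rel_of_pairwise_cons hsort'.of_cons hv3
            have hvle : v ≤ (pvR s).getLast hrne2 := hup v hv
            rw [← hbrl] at hvle ⊢
            exact le_antisymm hvle hble
        exact pvPigeon z1 z2 z3 a _ h12 h13 h23 (hvals z1 hz1r) (hvals z2 hz2r) (hvals z3 hz3r)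
    have hc3 : ¬ ((pvR s).getLast hrne2 = a + 1 ∧ PySem.List.pyGet? (pvR s) (-2) = some a) := by
      rintro ⟨-, hget⟩
      have hRange : PySem.Raise.InRange (pvR s).length (-2) := by
        by_contra hcon
        have hnone := (PySem.List.pyGet?_eq_none_iff (pvR s) (-2)).mpr hcon
        rw [hget] at hnone
        simp at hnone
      have hlen2 : 2 ≤ (pvR s).length := by
        simp only [PySem.Raise.InRange] at hRange
        omega
      rw [PySem.List.pyGet?_neg_ofNat _ 2 (by omega) hlen2] at hget
      have hm2 : (pvR s)[(pvR s).length - 2] = a := by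
        have hidx : (pvR s).length - 2 < (pvR s).length := by omega
        rw [List.getElem?_eq_getElem hidx] at hget
        exact Option.some_inj.mp hget
      have hmono := List.pairwise_iff_getElem.mp hRsort
      have hvals : ∀ v ∈ pvR s, v = a ∨ v = (pvR s).getLast hrne2 := by
        intro v hv
        obtain ⟨i, hi, hvi⟩ := List.mem_iff_getElem.mp hv
        subst hvi
        by_cases hilast : i = (pvR s).length - 1
        · right
          subst hilast
          exact (List.getLast_eq_getElem _).symm
        · left
          have hvle : (pvR s)[i] ≤ a := by
            rcases Nat.lt_or_ge i ((pvR s).length - 2) with hlt' | hge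
            · rw [← hm2]
              exact hmono i ((pvR s).length - 2) hi (by omega) hlt'
            · have hieq : i = (pvR s).length - 2 := by omega
              subst hieq
              exact le_of_eq hm2
          exact le_antisymm hvle (hlow _ hv)
      exact pvPigeon z1 z2 z3 a _ h12 h13 h23 (hvals z1 hz1r) (hvals z2 hz2r) (hvals z3 hz3r)
    rw [pvMatchRed (pvR s) a ((pvR s).getLast hrne2) hget0 hlast,
      if_neg hc1, if_neg hc2, if_neg hc3]
  · by_cases h1 : (pvK s.toList).length = 1
    · -- a single frequency value: A says YES, B says YES, D is false
      rw [if_neg h2, if_pos h1]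
      have hDnot : ¬ D_Sherlock s := fun hD => by rw [pvDlen2 s hD] at h1; omega
      refine ⟨fun _ => ?_, fun hD => absurd hD hDnot⟩
      obtain ⟨k, hk⟩ := List.length_eq_one_iff.mp h1
      have hallx : ∀ z ∈ pvX s.toList, z = k := by
        intro z hz
        have := (hKmem z).mpr hz
        rw [hk] at this
        simpa using this
      obtain ⟨a, t, hr⟩ := List.exists_cons_of_ne_nil hRne
      have hget0 : PySem.List.pyGet? (pvR s) 0 = some a := by
        rw [hr]
        exact PySem.List.pyGet?_zero_cons ..
      have hrne2 : pvR s ≠ [] := hRne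
      have hlast : PySem.List.pyGet? (pvR s) (-1) = some ((pvR s).getLast hrne2) := by
        rw [PySem.List.pyGet?_neg_one, List.getLast?_eq_some_getLast hrne2]
      rw [pvMatchRed (pvR s) a ((pvR s).getLast hrne2) hget0 hlast]
      have ha : a = k := hallx a (hRperm.mem_iff.mp (by rw [hr]; simp))
      have hl : (pvR s).getLast hrne2 = k :=
        hallx _ (hRperm.mem_iff.mp (List.getLast_mem hrne2))
      rw [ha, hl, if_pos rfl]
    · -- exactly two frequency values
      have h2' : (pvK s.toList).length = 2 := by omega
      rw [if_neg h2, if_neg h1]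
      obtain ⟨κ0, κ1, hK⟩ := pvLen2 _ h2'
      have hNod : (pvK s.toList).Nodup := PySem.Set.nodup_ofList _
      rw [hK] at hNod
      have hκne : κ0 ≠ κ1 := by simpa using (List.nodup_cons.mp hNod).1
      have h0X : κ0 ∈ pvX s.toList := (hKmem κ0).mp (by rw [hK]; simp)
      have h1X : κ1 ∈ pvX s.toList := (hKmem κ1).mp (by rw [hK]; simp)
      have hallX : ∀ z ∈ pvX s.toList, z = κ0 ∨ z = κ1 := by
        intro z hz
        have := (hKmem z).mpr hz
        rw [hK] at this
        simpa using this
      rw [hK]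
      simp only [List.map_cons, List.map_nil]
      have hp0 : PySem.List.pyGet?
          [(((pvX s.toList).count κ0 : Int)), (((pvX s.toList).count κ1 : Int))] 0
          = some (((pvX s.toList).count κ0 : Int)) := rfl
      have hp1 : PySem.List.pyGet?
          [(((pvX s.toList).count κ0 : Int)), (((pvX s.toList).count κ1 : Int))] 1
          = some (((pvX s.toList).count κ1 : Int)) := rfl
      have hl0 : PySem.List.pyGet? [κ0, κ1] 0 = some κ0 := rfl
      have hl1 : PySem.List.pyGet? [κ0, κ1] 1 = some κ1 := rfl
      rw [hp0, hp1, hl0, hl1, pvMatchRed4]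
      rcases lt_trichotomy κ0 κ1 with hlt | heq | hgt
      · exact pvL2main s κ0 κ1 hlt hne h0X h1X hallX (D_Sherlock s) Iff.rfl
      · exact absurd heq hκne
      · have hallX' : ∀ z ∈ pvX s.toList, z = κ1 ∨ z = κ0 := fun z hz => (hallX z hz).symm
        have hcomm : ((((pvX s.toList).count κ0 : Int)) > 1 ∧ (((pvX s.toList).count κ1 : Int)) > 1)
            ↔ ((((pvX s.toList).count κ1 : Int)) > 1 ∧ (((pvX s.toList).count κ0 : Int)) > 1) :=
          and_comm
        rw [if_congr hcomm rfl rfl, abs_sub_comm κ0 κ1]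
        exact pvL2main s κ1 κ0 hgt hne h1X h0X hallX' (D_Sherlock s) Iff.rfl

-- ===== VERDICT (by name: the statement is the Claim_ definition above) =====
theorem Sherlock_spec : Claim_unchanged_Sherlock := by
  intro s _ hpre hD
  exact ((pvAB s hpre).1 hD).symm ▸ rfl

theorem Sherlock_changed : Claim_changed_Sherlock := by
  unfold Claim_changed_Sherlock; decide

theorem Sherlock_tight : Claim_exact_Sherlock := by
  intro s _ hpre hD
  exact (pvAB s hpre).2 hD
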